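-- pv_equiv track=rewrite | github.com/Revi1337/BaekJoon-Coding-Test | 백준/Gold/14676. 영우는 사기꾼？/영우는 사기꾼？.py | solution
-- ===== SOURCE A (Python) =====
-- def solution(N, M, K, E, G):
--     dag = [[] for _ in range(N + 1)]
--     ind, cnt = [[0] * (N + 1) for _ in range(2)]
--     for v1, v2 in E:
--         dag[v1].append(v2)
--         ind[v2] += 1
--
--     for op, n in G:
--         if op == 1:
--             if ind[n] > 0:
--                 return "Lier!"
--             cnt[n] += 1
--             if cnt[n] == 1:
--                 for nn in dag[n]:
--                     ind[nn] -= 1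
--         else:
--             if cnt[n] == 0:
--                 return "Lier!"
--             cnt[n] -= 1
--             if cnt[n] == 0:
--                 for nn in dag[n]:
--                     ind[nn] += 1
--
--     return "King-God-Emperor"
-- ===== SOURCE B (Python) =====
-- def solution(N, M, K, E, G):
--     pre = [[] for _ in range(N + 1)]
--     for v1, v2 in E:
--         pre[v2].append(v1)
--     cnt = [0] * (N + 1)
--     for op, n in G:
--         if op == 1:
--             if not all(cnt[p] > 0 for p in pre[n]):
--                 return "Lier!"
--             cnt[n] += 1
--         else:
--             if cnt[n] == 0:
--                 return "Lier!"
--             cnt[n] -= 1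
--     return "King-God-Emperor"
-- ===== Notes on version B (the rewrite author's own statement) =====
-- stated objective: alternative
-- what changed: Replaces A's incrementally maintained indegree array (updated along forward edges on every 0/1 count transition) by a reverse-adjacency list built once and a direct all()-scan of a building's prerequisites at each build operation; only the cnt array is maintained.
-- outside the precondition, e.g. on solution(1, 0, 0, [], [(2, 0), (1, 5)]): A returns 'Lier!', B returns 'Lier!'
import Mathlib
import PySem

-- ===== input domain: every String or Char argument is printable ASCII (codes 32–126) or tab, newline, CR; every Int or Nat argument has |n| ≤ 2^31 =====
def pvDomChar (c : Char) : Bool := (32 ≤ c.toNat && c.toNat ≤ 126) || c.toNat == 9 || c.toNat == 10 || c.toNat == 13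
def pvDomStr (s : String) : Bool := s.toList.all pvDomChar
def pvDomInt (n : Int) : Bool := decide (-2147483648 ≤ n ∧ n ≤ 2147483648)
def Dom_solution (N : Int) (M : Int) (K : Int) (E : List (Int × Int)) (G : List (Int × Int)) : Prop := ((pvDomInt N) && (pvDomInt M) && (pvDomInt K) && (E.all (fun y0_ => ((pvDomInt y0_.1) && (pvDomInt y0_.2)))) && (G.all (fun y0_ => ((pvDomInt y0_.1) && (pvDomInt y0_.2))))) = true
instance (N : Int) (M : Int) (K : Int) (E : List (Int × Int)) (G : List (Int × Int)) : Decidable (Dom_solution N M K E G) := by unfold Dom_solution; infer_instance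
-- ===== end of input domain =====

-- B replaces A's incrementally maintained indegree array by a reverse-adjacency list and a
-- direct scan of a building's prerequisites at each build operation (alternative algorithm,
-- similar cost). Return value only; A mutates no argument.

-- ===== PORT A =====
-- the 'for op, n in G' loop of A, with its two early returns, as structural recursion
def pvLoopA (dag : List (List Int)) : List (Int × Int) → List Int → List Int → String
  | [], _ind, _cnt => "King-God-Emperor"
  | (op, n) :: rest, ind, cnt =>
    if op = 1 then
      if 0 < PySem.List.pyGetD ind n 0 then "Lier!"
      else
        let cnt' := PySem.List.pySetD cnt n (PySem.List.pyGetD cnt n 0 + 1)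
        let ind' := if PySem.List.pyGetD cnt' n 0 = 1 then
            (PySem.List.pyGetD dag n []).foldl
              (fun a nn => PySem.List.pySetD a nn (PySem.List.pyGetD a nn 0 - 1)) ind
          else ind
        pvLoopA dag rest ind' cnt'
    else
      if PySem.List.pyGetD cnt n 0 = 0 then "Lier!"
      else
        let cnt' := PySem.List.pySetD cnt n (PySem.List.pyGetD cnt n 0 - 1)
        let ind' := if PySem.List.pyGetD cnt' n 0 = 0 then
            (PySem.List.pyGetD dag n []).foldl
              (fun a nn => PySem.List.pySetD a nn (PySem.List.pyGetD a nn 0 + 1)) ind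
          else ind
        pvLoopA dag rest ind' cnt'

def solution (N : Int) (M : Int) (K : Int) (E : List (Int × Int)) (G : List (Int × Int)) : String :=
  -- dag = [[] for _ in range(N+1)] ; ind, cnt = [[0]*(N+1) for _ in range(2)]
  let dag0 : List (List Int) := (PySem.List.pyRange 0 (N + 1) 1).map (fun _ => [])
  let ind0 : List Int := List.replicate (N + 1).toNat 0   -- [0]*(N+1): exact also for N+1 ≤ 0
  let cnt0 : List Int := List.replicate (N + 1).toNat 0
  -- for v1, v2 in E: dag[v1].append(v2); ind[v2] += 1
  let s := E.foldl (fun (s : List (List Int) × List Int) e =>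
      (PySem.List.pySetD s.1 e.1 (PySem.List.pyGetD s.1 e.1 [] ++ [e.2]),
       PySem.List.pySetD s.2 e.2 (PySem.List.pyGetD s.2 e.2 0 + 1))) (dag0, ind0)
  pvLoopA s.1 G s.2 cnt0

-- ===== PORT B =====
-- the 'for op, n in G' loop of B: only cnt is maintained, build checks all prerequisites
def pvLoopB (pre : List (List Int)) : List (Int × Int) → List Int → String
  | [], _cnt => "King-God-Emperor"
  | (op, n) :: rest, cnt =>
    if op = 1 then
      if ¬ ((PySem.List.pyGetD pre n []).all (fun p => decide (0 < PySem.List.pyGetD cnt p 0))) then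
        "Lier!"
      else
        pvLoopB pre rest (PySem.List.pySetD cnt n (PySem.List.pyGetD cnt n 0 + 1))
    else
      if PySem.List.pyGetD cnt n 0 = 0 then "Lier!"
      else
        pvLoopB pre rest (PySem.List.pySetD cnt n (PySem.List.pyGetD cnt n 0 - 1))

def solution_alt (N : Int) (M : Int) (K : Int) (E : List (Int × Int)) (G : List (Int × Int)) : String :=
  -- pre = [[] for _ in range(N+1)]; for v1, v2 in E: pre[v2].append(v1)
  let pre := E.foldl (fun a e => PySem.List.pySetD a e.2 (PySem.List.pyGetD a e.2 [] ++ [e.1]))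
      ((PySem.List.pyRange 0 (N + 1) 1).map (fun _ => []))
  pvLoopB pre G (List.replicate (N + 1).toNat 0)

-- ===== PRECONDITION & SPEC =====
-- Pre_ excludes inputs where some edge endpoint or some operation's building number is not a
-- valid (possibly negative) Python index into the arrays of length N+1: there A raises
-- IndexError, except when an earlier operation already returned "Lier!" (then both return "Lier!").
def Pre_solution (N : Int) (M : Int) (K : Int) (E : List (Int × Int)) (G : List (Int × Int)) : Prop :=
  (∀ e ∈ E, PySem.Raise.InRange (N + 1).toNat e.1 ∧ PySem.Raise.InRange (N + 1).toNat e.2) ∧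
  (∀ g ∈ G, PySem.Raise.InRange (N + 1).toNat g.2)
instance (N : Int) (M : Int) (K : Int) (E : List (Int × Int)) (G : List (Int × Int)) : Decidable (Pre_solution N M K E G) := by unfold Pre_solution; infer_instance

def pvWitness_solution : Int × Int × Int × (List (Int × Int)) × (List (Int × Int)) :=
  (2, 2, 3, [(0, 1), (1, 2)], [(1, 0), (1, 1), (2, 1), (1, 1), (1, 2)])

def Spec_solution (N : Int) (M : Int) (K : Int) (E : List (Int × Int)) (G : List (Int × Int)) (out : String) : Prop := out = solution_alt N M K E G
instance (N : Int) (M : Int) (K : Int) (E : List (Int × Int)) (G : List (Int × Int)) (out : String) : Decidable (Spec_solution N M K E G out) := by unfold Spec_solution; infer_instance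

-- ===== CLAIM (what is proved, stated in full; the proofs are below) =====
def Claim_equal_solution : Prop := ∀ (N : Int) (M : Int) (K : Int) (E : List (Int × Int)) (G : List (Int × Int)), Dom_solution N M K E G → Pre_solution N M K E G → Spec_solution N M K E G (solution N M K E G)

-- ===== LEMMAS AND PROOFS =====

-- the Nat index a Python index i denotes in a list of length L
def pvNidx (L : Nat) (i : Int) : Nat := (i % (L : Int)).toNat

theorem pvNidx_lt (L : Nat) (i : Int) (hL : 0 < L) : pvNidx L i < L := by
  unfold pvNidx
  have h1 : i % (L : Int) < L := Int.emod_lt_of_pos i (by exact_mod_cast hL)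
  omega

theorem pvInRange_pos (L : Nat) (i : Int) (h : PySem.Raise.InRange L i) : 0 < L := by
  obtain ⟨h1, h2⟩ := h; omega

theorem pvIdx?_eq (L : Nat) (i : Int) (h : PySem.Raise.InRange L i) :
    PySem.List.pyIdx? L i = some (pvNidx L i) := by
  obtain ⟨h1, h2⟩ := h
  unfold PySem.List.pyIdx? pvNidx
  by_cases h0 : 0 ≤ i
  · rw [if_pos h0, if_pos h2, Int.emod_eq_of_lt h0 h2]
  · rw [if_neg h0, if_pos h1]
    have h4 : (i + (L : Int) * 1) % L = i % L := Int.add_mul_emod_self_left i (L : Int) 1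
    have h5 : (i + (L : Int)) % L = i + L := Int.emod_eq_of_lt (by omega) (by omega)
    rw [mul_one] at h4
    simp only [Option.some.injEq]
    omega

theorem pvGetD_eq {α : Type} (xs : List α) (i : Int) (d : α)
    (h : PySem.Raise.InRange xs.length i) :
    PySem.List.pyGetD xs i d = xs.getD (pvNidx xs.length i) d := by
  unfold PySem.List.pyGetD PySem.List.pyGet?
  rw [pvIdx?_eq _ _ h]
  simp [List.getD]

theorem pvSetD_eq {α : Type} (xs : List α) (i : Int) (v : α)
    (h : PySem.Raise.InRange xs.length i) :
    PySem.List.pySetD xs i v = xs.set (pvNidx xs.length i) v := by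
  unfold PySem.List.pySetD PySem.List.pySet?
  rw [pvIdx?_eq _ _ h]
  rfl

theorem pvGetD_set_self {α : Type} (xs : List α) (k : Nat) (v : α) (d : α) (hk : k < xs.length) :
    (xs.set k v).getD k d = v := by
  simp [List.getD, List.getElem?_set_self, hk]

theorem pvGetD_set_ne {α : Type} (xs : List α) (k j : Nat) (v : α) (d : α) (hne : k ≠ j) :
    (xs.set k v).getD j d = xs.getD j d := by
  simp [List.getD, List.getElem?_set_ne, hne]

-- splitting a pair-fold whose components do not interact
theorem pvFoldl_pair {α β γ : Type} (f : α → γ → α) (g : β → γ → β) (l : List γ) (a : α) (b : β) :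
    l.foldl (fun s e => (f s.1 e, g s.2 e)) (a, b) = (l.foldl f a, l.foldl g b) := by
  induction l generalizing a b with
  | nil => rfl
  | cons x xs ih => simp [List.foldl_cons, ih]

-- building a reverse/forward adjacency list by repeated append
theorem pvAdj_build (sel oth : Int × Int → Int) (E : List (Int × Int)) (acc : List (List Int))
    (hE : ∀ e ∈ E, PySem.Raise.InRange acc.length (sel e)) :
    (E.foldl (fun a e => PySem.List.pySetD a (sel e) (PySem.List.pyGetD a (sel e) [] ++ [oth e])) acc).length = acc.length ∧
    ∀ j, (E.foldl (fun a e => PySem.List.pySetD a (sel e) (PySem.List.pyGetD a (sel e) [] ++ [oth e])) acc).getD j []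
      = acc.getD j [] ++ (E.filter (fun e => pvNidx acc.length (sel e) = j)).map oth := by
  induction E generalizing acc with
  | nil => simp
  | cons e es ih =>
    have he := hE e (by simp)
    have hlt := pvNidx_lt acc.length (sel e) (pvInRange_pos _ _ he)
    have hstep : PySem.List.pySetD acc (sel e) (PySem.List.pyGetD acc (sel e) [] ++ [oth e])
        = acc.set (pvNidx acc.length (sel e)) (acc.getD (pvNidx acc.length (sel e)) [] ++ [oth e]) := by
      rw [pvSetD_eq _ _ _ he, pvGetD_eq _ _ _ he]
    have hlen : (acc.set (pvNidx acc.length (sel e)) (acc.getD (pvNidx acc.length (sel e)) [] ++ [oth e])).length = acc.length := by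
      simp
    obtain ⟨ihl, ihg⟩ := ih (acc.set (pvNidx acc.length (sel e)) (acc.getD (pvNidx acc.length (sel e)) [] ++ [oth e]))
      (by intro x hx; rw [hlen]; exact hE x (by simp [hx]))
    constructor
    · simp only [List.foldl_cons, hstep, ihl, hlen]
    · intro j
      simp only [List.foldl_cons, hstep]
      rw [ihg j]
      simp only [hlen]
      by_cases hj : pvNidx acc.length (sel e) = j
      · subst hj
        rw [pvGetD_set_self _ _ _ _ hlt]
        simp [List.filter_cons]
      · rw [pvGetD_set_ne _ _ _ _ _ hj]
        simp [List.filter_cons, hj]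

-- building the indegree array by repeated += 1
theorem pvInd_build (E : List (Int × Int)) (acc : List Int)
    (hE : ∀ e ∈ E, PySem.Raise.InRange acc.length e.2) :
    (E.foldl (fun a e => PySem.List.pySetD a e.2 (PySem.List.pyGetD a e.2 0 + 1)) acc).length = acc.length ∧
    ∀ j, (E.foldl (fun a e => PySem.List.pySetD a e.2 (PySem.List.pyGetD a e.2 0 + 1)) acc).getD j 0
      = acc.getD j 0 + (E.countP (fun e => pvNidx acc.length e.2 = j) : Int) := by
  induction E generalizing acc with
  | nil => simp
  | cons e es ih =>
    have he := hE e (by simp)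
    have hlt := pvNidx_lt acc.length e.2 (pvInRange_pos _ _ he)
    have hstep : PySem.List.pySetD acc e.2 (PySem.List.pyGetD acc e.2 0 + 1)
        = acc.set (pvNidx acc.length e.2) (acc.getD (pvNidx acc.length e.2) 0 + 1) := by
      rw [pvSetD_eq _ _ _ he, pvGetD_eq _ _ _ he]
    have hlen : (acc.set (pvNidx acc.length e.2) (acc.getD (pvNidx acc.length e.2) 0 + 1)).length = acc.length := by simp
    obtain ⟨ihl, ihg⟩ := ih (acc.set (pvNidx acc.length e.2) (acc.getD (pvNidx acc.length e.2) 0 + 1))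
      (by intro x hx; rw [hlen]; exact hE x (by simp [hx]))
    constructor
    · simp only [List.foldl_cons, hstep, ihl, hlen]
    · intro j
      simp only [List.foldl_cons, hstep]
      rw [ihg j]
      simp only [hlen, List.countP_cons]
      by_cases hj : pvNidx acc.length e.2 = j
      · subst hj
        rw [pvGetD_set_self _ _ _ _ hlt]
        simp <;> push_cast <;> ring
      · rw [pvGetD_set_ne _ _ _ _ _ hj]
        simp [hj]

-- the ind-adjusting inner fold of A adds c at each listed (normalized) index
theorem pvFold_add (c : Int) (ts : List Int) (ind : List Int)
    (hts : ∀ t ∈ ts, PySem.Raise.InRange ind.length t) :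
    (ts.foldl (fun a t => PySem.List.pySetD a t (PySem.List.pyGetD a t 0 + c)) ind).length = ind.length ∧
    ∀ j, (ts.foldl (fun a t => PySem.List.pySetD a t (PySem.List.pyGetD a t 0 + c)) ind).getD j 0
      = ind.getD j 0 + c * (ts.countP (fun t => pvNidx ind.length t = j) : Int) := by
  induction ts generalizing ind with
  | nil => simp
  | cons t ts ih =>
    have ht := hts t (by simp)
    have hlt := pvNidx_lt ind.length t (pvInRange_pos _ _ ht)
    have hstep : PySem.List.pySetD ind t (PySem.List.pyGetD ind t 0 + c)
        = ind.set (pvNidx ind.length t) (ind.getD (pvNidx ind.length t) 0 + c) := by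
      rw [pvSetD_eq _ _ _ ht, pvGetD_eq _ _ _ ht]
    have hlen : (ind.set (pvNidx ind.length t) (ind.getD (pvNidx ind.length t) 0 + c)).length = ind.length := by simp
    obtain ⟨ihl, ihg⟩ := ih (ind.set (pvNidx ind.length t) (ind.getD (pvNidx ind.length t) 0 + c))
      (by intro x hx; rw [hlen]; exact hts x (by simp [hx]))
    constructor
    · simp only [List.foldl_cons, hstep, ihl, hlen]
    · intro j
      simp only [List.foldl_cons, hstep]
      rw [ihg j]
      simp only [hlen, List.countP_cons]
      by_cases hj : pvNidx ind.length t = j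
      · subst hj
        rw [pvGetD_set_self _ _ _ _ hlt]
        simp <;> push_cast <;> ring
      · rw [pvGetD_set_ne _ _ _ _ _ hj]
        simp [hj] <;> push_cast <;> ring

-- how the zero-count predicate over sources changes when cnt is written at one index
theorem pvCountP_set (S : List (Int × Int)) (cnt : List Int) (m : Nat) (hm : m < cnt.length) (v : Int) :
    (S.countP (fun e => (cnt.set m v).getD (pvNidx cnt.length e.1) 0 = 0) : Int)
    = (S.countP (fun e => cnt.getD (pvNidx cnt.length e.1) 0 = 0) : Int)
      + ((if v = 0 then 1 else 0) - (if cnt.getD m 0 = 0 then 1 else 0))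
        * (S.countP (fun e => pvNidx cnt.length e.1 = m) : Int) := by
  induction S with
  | nil => simp
  | cons e es ih =>
    simp only [List.countP_cons]
    push_cast
    rw [ih]
    by_cases hj : pvNidx cnt.length e.1 = m
    · rw [hj, pvGetD_set_self _ _ _ _ hm]
      by_cases hv : v = 0 <;> by_cases hc : cnt.getD m 0 = 0 <;>
        simp only [hv, hc, decide_true, decide_false, if_true, if_false, decide_eq_true_eq,
          if_pos, reduceIte] <;> simp [hc] <;> ring
    · rw [pvGetD_set_ne _ _ _ _ _ (fun h => hj h.symm)]
      have hj' : (decide (pvNidx cnt.length e.1 = m)) = false := by simp [hj]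
      rw [hj']
      by_cases hc : cnt.getD (pvNidx cnt.length e.1) 0 = 0 <;> simp [hc] <;> ring

-- the indegree invariant: what A's ind array holds, as a function of E and cnt
def pvIndVal (L : Nat) (E : List (Int × Int)) (cnt : List Int) (j : Nat) : Int :=
  ((E.filter (fun e => pvNidx L e.2 = j)).countP (fun e => cnt.getD (pvNidx L e.1) 0 = 0) : Int)


-- countP over two successive filters commutes
theorem pvFilter_countP_comm {α : Type} (l : List α) (p q : α → Bool) :
    (l.filter p).countP q = (l.filter q).countP p := by
  rw [List.countP_filter, List.countP_filter]
  apply List.countP_congr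
  intro a _
  simp [Bool.and_comm]

theorem pvGetD_replicate (n j : Nat) : (List.replicate n (0 : Int)).getD j 0 = 0 := by
  simp only [List.getD, List.getElem?_replicate]
  split <;> rfl

theorem pvGetD_constNil {α : Type} (l : List α) (j : Nat) :
    (l.map (fun _ => ([] : List Int))).getD j [] = [] := by
  cases h : l[j]? <;> simp [List.getD, List.getElem?_map, h]

-- writing cnt at m without changing zeroness leaves the indegree values unchanged
theorem pvIndVal_set_same (L : Nat) (E : List (Int × Int)) (cnt : List Int) (m : Nat) (v : Int)
    (hcntL : cnt.length = L) (hm : m < L) (hsame : (v = 0) ↔ (cnt.getD m 0 = 0)) :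
    ∀ j, pvIndVal L E (cnt.set m v) j = pvIndVal L E cnt j := by
  intro j
  unfold pvIndVal
  have h := pvCountP_set (E.filter (fun e => pvNidx L e.2 = j)) cnt m (by rw [hcntL]; exact hm) v
  rw [hcntL] at h
  rw [h]
  by_cases hv : v = 0
  · rw [if_pos hv, if_pos (hsame.mp hv)]
    ring
  · have hcm : ¬ (cnt.getD m 0 = 0) := fun hc => hv (hsame.mpr hc)
    rw [if_neg hv, if_neg hcm]
    ring

-- A's inner ind-adjusting fold realizes the indegree values of the updated cnt
theorem pvFold_ind (L : Nat) (E : List (Int × Int)) (ind cnt : List Int) (m : Nat) (hm : m < L)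
    (hindL : ind.length = L) (hcntL : cnt.length = L)
    (hEr : ∀ e ∈ E, PySem.Raise.InRange L e.1 ∧ PySem.Raise.InRange L e.2)
    (hind : ∀ j, ind.getD j 0 = pvIndVal L E cnt j) (v c : Int)
    (hc : ((if v = 0 then (1 : Int) else 0) - (if cnt.getD m 0 = 0 then 1 else 0)) = c) :
    (((E.filter (fun e => pvNidx L e.1 = m)).map (·.2)).foldl
        (fun a t => PySem.List.pySetD a t (PySem.List.pyGetD a t 0 + c)) ind).length = ind.length ∧
    ∀ j, (((E.filter (fun e => pvNidx L e.1 = m)).map (·.2)).foldl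
        (fun a t => PySem.List.pySetD a t (PySem.List.pyGetD a t 0 + c)) ind).getD j 0
      = pvIndVal L E (cnt.set m v) j := by
  have hts : ∀ t ∈ (E.filter (fun e => pvNidx L e.1 = m)).map (·.2),
      PySem.Raise.InRange ind.length t := by
    intro t ht
    rw [hindL]
    obtain ⟨e, he, rfl⟩ := List.mem_map.mp ht
    exact (hEr e (List.mem_of_mem_filter he)).2
  obtain ⟨hl, hg⟩ := pvFold_add c _ ind hts
  refine ⟨hl, fun j => ?_⟩
  rw [hg j, hind j]
  unfold pvIndVal
  have h := pvCountP_set (E.filter (fun e => pvNidx L e.2 = j)) cnt m (by rw [hcntL]; exact hm) v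
  rw [hcntL] at h
  rw [h, hc, List.countP_map, hindL]
  rw [show ((fun t => decide (pvNidx L t = j)) ∘ (fun e : Int × Int => e.2))
      = (fun e : Int × Int => decide (pvNidx L e.2 = j)) from rfl]
  rw [pvFilter_countP_comm E (fun e => decide (pvNidx L e.1 = m))
      (fun e => decide (pvNidx L e.2 = j))]

-- main loop equivalence under the invariant
theorem pvLoop_eq (L : Nat) (E : List (Int × Int)) (dag pre : List (List Int))
    (hEr : ∀ e ∈ E, PySem.Raise.InRange L e.1 ∧ PySem.Raise.InRange L e.2)
    (hdagL : dag.length = L) (hpreL : pre.length = L)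
    (hdag : ∀ j, dag.getD j [] = (E.filter (fun e => pvNidx L e.1 = j)).map (·.2))
    (hpre : ∀ j, pre.getD j [] = (E.filter (fun e => pvNidx L e.2 = j)).map (·.1))
    (ops : List (Int × Int)) (ind cnt : List Int)
    (hops : ∀ p ∈ ops, PySem.Raise.InRange L p.2)
    (hindL : ind.length = L) (hcntL : cnt.length = L)
    (hcnt : ∀ j, 0 ≤ cnt.getD j 0)
    (hind : ∀ j, ind.getD j 0 = pvIndVal L E cnt j) :
    pvLoopA dag ops ind cnt = pvLoopB pre ops cnt := by
  revert hops hindL hcntL hcnt hind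
  induction ops generalizing ind cnt with
  | nil => intro _ _ _ _ _; rfl
  | cons p rest ih =>
    intro hops hindL hcntL hcnt hind
    obtain ⟨op, n⟩ := p
    have hn : PySem.Raise.InRange L n := hops (op, n) (by simp)
    have hL : 0 < L := pvInRange_pos _ _ hn
    set m := pvNidx L n with hmdef
    have hm : m < L := pvNidx_lt _ _ hL
    have hmc : m < cnt.length := by omega
    have hrest : ∀ p ∈ rest, PySem.Raise.InRange L p.2 := fun p hp => hops p (by simp [hp])
    have hgcnt : PySem.List.pyGetD cnt n 0 = cnt.getD m 0 := by
      rw [pvGetD_eq cnt n 0 (by rw [hcntL]; exact hn), hcntL]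
    have hscnt : ∀ w, PySem.List.pySetD cnt n w = cnt.set m w := by
      intro w; rw [pvSetD_eq cnt n w (by rw [hcntL]; exact hn), hcntL]
    have hgind : PySem.List.pyGetD ind n 0 = ind.getD m 0 := by
      rw [pvGetD_eq ind n 0 (by rw [hindL]; exact hn), hindL]
    have hgdag : PySem.List.pyGetD dag n [] = (E.filter (fun e => pvNidx L e.1 = m)).map (·.2) := by
      rw [pvGetD_eq dag n [] (by rw [hdagL]; exact hn), hdagL, hdag]
    have hgpre : PySem.List.pyGetD pre n [] = (E.filter (fun e => pvNidx L e.2 = m)).map (·.1) := by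
      rw [pvGetD_eq pre n [] (by rw [hpreL]; exact hn), hpreL, hpre]
    have hgset : ∀ w, PySem.List.pyGetD (cnt.set m w) n 0 = w := by
      intro w
      rw [pvGetD_eq (cnt.set m w) n 0 (by simp only [List.length_set]; rw [hcntL]; exact hn)]
      simp only [List.length_set, hcntL, ← hmdef]
      exact pvGetD_set_self _ _ _ _ hmc
    have hcnt' : ∀ w, 0 ≤ w → ∀ j, 0 ≤ (cnt.set m w).getD j 0 := by
      intro w hw j
      by_cases hjm : m = j
      · subst hjm; rw [pvGetD_set_self _ _ _ _ hmc]; exact hw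
      · rw [pvGetD_set_ne _ _ _ _ _ hjm]; exact hcnt j
    have hsetL : ∀ w, (cnt.set m w).length = L := by intro w; simp [hcntL]
    simp only [pvLoopA, pvLoopB]
    by_cases hop : op = 1
    · rw [if_pos hop, if_pos hop]
      have hcondA : (0 < PySem.List.pyGetD ind n 0) ↔
          ¬ ((PySem.List.pyGetD pre n []).all
              (fun p => decide (0 < PySem.List.pyGetD cnt p 0)) = true) := by
        rw [hgind, hind m, hgpre]
        unfold pvIndVal
        rw [List.all_map]
        constructor
        · intro hpos hall
          rw [List.all_eq_true] at hall
          obtain ⟨e, he, hpe⟩ := List.countP_pos_iff.mp (by exact_mod_cast hpos)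
          have he1 : PySem.Raise.InRange L e.1 := (hEr e (List.mem_of_mem_filter he)).1
          have h2 := hall e he
          simp only [Function.comp] at h2
          rw [pvGetD_eq cnt e.1 0 (by rw [hcntL]; exact he1), hcntL] at h2
          simp only [decide_eq_true_eq] at h2 hpe
          omega
        · intro hnall
          by_contra hnot
          apply hnall
          rw [List.all_eq_true]
          intro e he
          have he1 : PySem.Raise.InRange L e.1 := (hEr e (List.mem_of_mem_filter he)).1
          simp only [Function.comp]
          rw [pvGetD_eq cnt e.1 0 (by rw [hcntL]; exact he1), hcntL]
          have hzero : (E.filter (fun e => pvNidx L e.2 = m)).countP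
              (fun e => decide (cnt.getD (pvNidx L e.1) 0 = 0)) = 0 := by omega
          have h3 := List.countP_eq_zero.mp hzero e he
          simp only [decide_eq_true_eq] at h3 ⊢
          have h4 := hcnt (pvNidx L e.1)
          omega
      by_cases hA : 0 < PySem.List.pyGetD ind n 0
      · rw [if_pos hA, if_pos (hcondA.mp hA)]
      · rw [if_neg hA, if_neg (fun hB => hA (hcondA.mpr hB))]
        rw [hscnt, hgcnt, hgset]
        by_cases hz : cnt.getD m 0 = 0
        · rw [if_pos (by omega)]
          rw [hgdag]
          obtain ⟨hl, hg⟩ := pvFold_ind L E ind cnt m hm hindL hcntL hEr hind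
            (cnt.getD m 0 + 1) (-1) (by rw [if_neg (by omega), if_pos hz]; ring)
          simp only [sub_eq_add_neg] at *
          exact ih _ _ hrest (by rw [hl, hindL]) (hsetL _) (hcnt' _ (by omega)) hg
        · rw [if_neg (by omega)]
          have hsame := pvIndVal_set_same L E cnt m (cnt.getD m 0 + 1) hcntL hm
            (by have h0 := hcnt m; constructor <;> intro h <;> [omega; (exact absurd h hz)])
          exact ih _ _ hrest hindL (hsetL _) (hcnt' _ (by have := hcnt m; omega))
            (fun j => by rw [hind j, hsame j])
    · rw [if_neg hop, if_neg hop, hgcnt]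
      by_cases hz0 : cnt.getD m 0 = 0
      · rw [if_pos hz0, if_pos hz0]
      · rw [if_neg hz0, if_neg hz0]
        rw [hscnt, hgset]
        by_cases hz1 : cnt.getD m 0 = 1
        · rw [if_pos (by omega)]
          rw [hgdag]
          obtain ⟨hl, hg⟩ := pvFold_ind L E ind cnt m hm hindL hcntL hEr hind
            (cnt.getD m 0 - 1) 1 (by rw [if_pos (by omega), if_neg hz0]; ring)
          simp only [sub_eq_add_neg] at *
          exact ih _ _ hrest (by rw [hl, hindL]) (hsetL _) (hcnt' _ (by omega)) hg
        · rw [if_neg (by omega)]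
          have hsame := pvIndVal_set_same L E cnt m (cnt.getD m 0 - 1) hcntL hm
            (by constructor <;> intro h <;> omega)
          exact ih _ _ hrest hindL (hsetL _) (hcnt' _ (by have := hcnt m; omega))
            (fun j => by rw [hind j, hsame j])

-- ===== VERDICT (by name: the statement is the Claim_ definition above) =====
theorem solution_spec : Claim_equal_solution := by
  unfold Claim_equal_solution Spec_solution
  intro N M K E G _ hPre
  obtain ⟨hE, hG⟩ := hPre
  unfold solution solution_alt
  dsimp only
  rw [pvFoldl_pair
    (fun (a : List (List Int)) (e : Int × Int) =>
      PySem.List.pySetD a e.1 (PySem.List.pyGetD a e.1 [] ++ [e.2]))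
    (fun (a : List Int) (e : Int × Int) =>
      PySem.List.pySetD a e.2 (PySem.List.pyGetD a e.2 0 + 1)) E
    ((PySem.List.pyRange 0 (N + 1) 1).map (fun _ => []))
    (List.replicate (N + 1).toNat 0)]
  have hlen0 : ((PySem.List.pyRange 0 (N + 1) 1).map (fun _ => ([] : List Int))).length
      = (N + 1).toNat := by
    simp only [List.length_map, PySem.List.length_pyRange_one, sub_zero]
  have hrlen : (List.replicate (N + 1).toNat (0 : Int)).length = (N + 1).toNat := by simp
  obtain ⟨hdagL, hdagG⟩ := pvAdj_build (·.1) (·.2) E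
    ((PySem.List.pyRange 0 (N + 1) 1).map (fun _ => ([] : List Int)))
    (by intro e he; rw [hlen0]; exact (hE e he).1)
  obtain ⟨hpreL, hpreG⟩ := pvAdj_build (·.2) (·.1) E
    ((PySem.List.pyRange 0 (N + 1) 1).map (fun _ => ([] : List Int)))
    (by intro e he; rw [hlen0]; exact (hE e he).2)
  obtain ⟨hindL, hindG⟩ := pvInd_build E (List.replicate (N + 1).toNat (0 : Int))
    (by intro e he; rw [hrlen]; exact (hE e he).2)
  apply pvLoop_eq ((N + 1).toNat) E
  · exact hE
  · rw [hdagL, hlen0]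
  · rw [hpreL, hlen0]
  · intro j
    rw [hdagG j, pvGetD_constNil]
    simp only [hlen0, List.nil_append]
  · intro j
    rw [hpreG j, pvGetD_constNil]
    simp only [hlen0, List.nil_append]
  · exact hG
  · rw [hindL, hrlen]
  · exact hrlen
  · intro j; rw [pvGetD_replicate]
  · intro j
    rw [hindG j, pvGetD_replicate, hrlen]
    unfold pvIndVal
    rw [List.countP_eq_length_filter]
    rw [List.countP_congr (q := fun _ => true)
      (by intro e _; simp [pvGetD_replicate])]
    rw [List.countP_true]
    simp
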